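-- pv_equiv track=rewrite | github.com/pierg/cogomo_old | src/helper/parser.py | _count_line
-- ===== SOURCE A (Python) =====
-- TAB_WIDTH = 2
--
-- COMMENT_CHAR = '#'
--
-- def _count_line(line):
--     """Returns a comment-free, tab-replaced line with no whitespace and the number of tabs"""
--     line = line.split(COMMENT_CHAR, 1)[0]  # remove comments
--     tab_count = 0
--     space_count = 0
--     for char in line:
--         if char == ' ':
--             space_count += 1
--         elif char == '\t':
--             tab_count += 1
--         else:
--             break
--     tab_count += int(space_count / 4)
--     line = line.replace('\t', ' ' * TAB_WIDTH)  # replace tabs with spaces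
--     return line.strip(), tab_count
-- ===== SOURCE B (Python) =====
-- TAB_WIDTH = 2
--
-- COMMENT_CHAR = '#'
--
-- def _count_line(line):
--     """Returns a comment-free, tab-replaced line with no whitespace and the number of tabs"""
--     tabs = spaces = 0
--     counting = True          # still inside the leading space/tab run
--     out = []                 # tab-expanded characters of the comment-free line
--     start = None             # index of first non-whitespace char in out
--     end = 0                  # one past the index of the last non-whitespace char in out
--     for ch in line:
--         if ch == COMMENT_CHAR:
--             break
--         if counting:
--             if ch == ' ':
--                 spaces += 1
--             elif ch == '\t':
--                 tabs += 1
--             else: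
--                 counting = False
--         if ch == '\t':
--             out.append(' ')
--             out.append(' ')
--         else:
--             out.append(ch)
--             if ch not in ' \n\r\v\f':
--                 if start is None:
--                     start = len(out) - 1
--                 end = len(out)
--     return ('' if start is None else ''.join(out[start:end])), tabs + spaces // 4
-- ===== Notes on version B (the rewrite author's own statement) =====
-- stated objective: alternative
-- what changed: Replaces A's staged pipeline (split at '#', separate indent-count loop, then replace and strip passes) with one fused state-machine pass that simultaneously breaks at the comment char, counts the indent run, expands tabs into an output buffer and tracks the first/last non-whitespace positions, slicing once at the end.
import Mathlib
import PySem

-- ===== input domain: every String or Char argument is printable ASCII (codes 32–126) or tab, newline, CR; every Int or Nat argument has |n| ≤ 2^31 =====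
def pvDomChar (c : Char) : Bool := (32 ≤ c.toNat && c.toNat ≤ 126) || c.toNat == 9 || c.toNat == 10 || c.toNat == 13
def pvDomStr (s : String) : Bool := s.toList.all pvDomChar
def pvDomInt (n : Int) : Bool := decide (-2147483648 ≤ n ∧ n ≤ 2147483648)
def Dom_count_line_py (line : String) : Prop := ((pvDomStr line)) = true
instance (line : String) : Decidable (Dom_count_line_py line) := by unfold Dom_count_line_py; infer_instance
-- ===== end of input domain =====

-- B replaces A's staged pipeline (split at '#', indent-count loop, then replace and strip passes)
-- with a single fused state-machine pass that breaks at '#', counts the indent run, expands tabs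
-- into an output buffer and tracks the first/last non-whitespace positions, slicing once at the end.

-- ===== PORT A =====
-- the for-loop of A: counts (tab_count, space_count) over leading chars, breaking at the first
-- char that is neither ' ' nor '\t'
def pvCountWS : List Char → Int × Int → Int × Int
  | [], st => st
  | c :: rest, (tab, sp) =>
    if c = ' ' then pvCountWS rest (tab, sp + 1)
    else if c = '\t' then pvCountWS rest (tab + 1, sp)
    else (tab, sp)

def count_line_py (line : String) : String × Int :=
  let code := ((PySem.Str.splitMax? line "#" 1).getD []).headD ""  -- line.split('#', 1)[0]
  let st := pvCountWS code.toList (0, 0)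
  -- int(space_count / 4): space_count ≥ 0, so truncating float division = floor division (exact for counts)
  let tab_count := st.1 + PySem.Int.floordiv st.2 4
  let code := PySem.Str.replace code "\t" "  "  -- TAB_WIDTH = 2
  (PySem.Str.strip code, tab_count)

-- ===== PORT B =====
-- the return expression of B: '' if start is None else ''.join(out[start:end]), and tabs + spaces // 4
def pvFinishB (tabs spaces : Int) (out : List Char) (start? : Option Nat) (end_ : Nat) : String × Int :=
  ((match start? with
    | none => ""
    | some s => String.ofList (PySem.List.slice out (some (s : Int)) (some (end_ : Int)))),
   tabs + PySem.Int.floordiv spaces 4)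

-- B's single for-loop: state (tabs, spaces, counting, out, start?, end_); breaks at '#'
def pvScanB : List Char → Int → Int → Bool → List Char → Option Nat → Nat → String × Int
  | [], tabs, spaces, _, out, start?, end_ => pvFinishB tabs spaces out start? end_
  | c :: rest, tabs, spaces, counting, out, start?, end_ =>
    if c = '#' then pvFinishB tabs spaces out start? end_
    else
      let st :=
        if counting then
          if c = ' ' then (tabs, spaces + 1, true)
          else if c = '\t' then (tabs + 1, spaces, true)
          else (tabs, spaces, false)
        else (tabs, spaces, counting)
      if c = '\t' then
        pvScanB rest st.1 st.2.1 st.2.2 (out ++ [' '] ++ [' ']) start? end_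
      else
        if c = ' ' || c = '\n' || c = '\r' || c = '\x0b' || c = '\x0c' then
          pvScanB rest st.1 st.2.1 st.2.2 (out ++ [c]) start? end_
        else
          pvScanB rest st.1 st.2.1 st.2.2 (out ++ [c])
            (some (match start? with | none => (out ++ [c]).length - 1 | some s => s))
            (out ++ [c]).length

def count_line_py_alt (line : String) : String × Int :=
  pvScanB line.toList 0 0 true [] none 0

-- ===== PRECONDITION & SPEC =====
def Spec_count_line_py (line : String) (out : String × Int) : Prop := out = count_line_py_alt line
instance (line : String) (out : String × Int) : Decidable (Spec_count_line_py line out) := by unfold Spec_count_line_py; infer_instance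

-- ===== CLAIM (what is proved, stated in full; the proofs are below) =====
def Claim_equal_count_line_py : Prop := ∀ (line : String), Dom_count_line_py line → Spec_count_line_py line (count_line_py line)

-- ===== LEMMAS AND PROOFS =====

-- proof-side vocabulary
def pvExpand (l : List Char) : List Char := l.flatMap fun c => if c = '\t' then [' ', ' '] else [c]
def pvFirstNW (o : List Char) : Option Nat := o.findIdx? fun c => !PySem.Chars.isspace c
def pvEndNW (o : List Char) : Nat := o.length - (o.reverse.takeWhile PySem.Chars.isspace).length
def pvCntT (l : List Char) : Int := ((l.takeWhile fun c => c = ' ' || c = '\t').count '\t' : Int)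
def pvCntS (l : List Char) : Int := ((l.takeWhile fun c => c = ' ' || c = '\t').count ' ' : Int)

theorem pv_char_eq_iff (c d : Char) : (c = d) ↔ c.toNat = d.toNat := by
  rw [Char.ext_iff, UInt32.ext_iff]; rfl

-- on the input domain, B's 5-char whitespace test (for a non-tab char) is Python's isspace
theorem pv_dom_ws5 (c : Char) (h : pvDomChar c = true) (ht : c ≠ '\t') :
    (c = ' ' || c = '\n' || c = '\r' || c = '\x0b' || c = '\x0c') = PySem.Chars.isspace c := by
  have hc : ∀ d : Char, (c = d) ↔ c.toNat = d.toNat := fun d => pv_char_eq_iff c d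
  have ht' : c.toNat ≠ ('\t').toNat := fun hn => ht ((hc '\t').mpr hn)
  simp only [pvDomChar, Bool.or_eq_true, Bool.and_eq_true, beq_iff_eq, decide_eq_true_eq] at h
  apply Bool.eq_iff_iff.mpr
  simp only [PySem.Chars.isspace, Bool.or_eq_true, Bool.and_eq_true, decide_eq_true_eq, hc]
  have e1 : (' ' : Char).toNat = 32 := by decide
  have e2 : ('\t' : Char).toNat = 9 := by decide
  have e3 : ('\n' : Char).toNat = 10 := by decide
  have e4 : ('\r' : Char).toNat = 13 := by decide
  have e5 : ('\x0b' : Char).toNat = 11 := by decide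
  have e6 : ('\x0c' : Char).toNat = 12 := by decide
  rw [e2] at ht'
  rw [e1, e3, e4, e5, e6]
  omega

theorem pv_firstNW_append_ws (o e : List Char) (he : ∀ x ∈ e, PySem.Chars.isspace x = true) :
    pvFirstNW (o ++ e) = pvFirstNW o := by
  unfold pvFirstNW
  rw [List.findIdx?_append]
  have : List.findIdx? (fun c => !PySem.Chars.isspace c) e = none := by
    rw [List.findIdx?_eq_none_iff]
    intro x hx; simp [he x hx]
  simp [this]

theorem pv_takeWhile_all (p : Char → Bool) (e : List Char) (he : ∀ x ∈ e, p x = true) :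
    e.takeWhile p = e := List.takeWhile_eq_self_iff.mpr he

theorem pv_endNW_append_ws (o e : List Char) (he : ∀ x ∈ e, PySem.Chars.isspace x = true) :
    pvEndNW (o ++ e) = pvEndNW o := by
  unfold pvEndNW
  rw [List.reverse_append, List.takeWhile_append]
  have hall : e.reverse.takeWhile PySem.Chars.isspace = e.reverse := by
    apply pv_takeWhile_all; intro x hx; exact he x (List.mem_reverse.mp hx)
  have hle : (o.reverse.takeWhile PySem.Chars.isspace).length ≤ o.length := by
    have := (List.takeWhile_prefix (l := o.reverse) PySem.Chars.isspace).length_le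
    simpa using this
  rw [if_pos (by rw [hall])]
  simp only [List.length_append, List.length_reverse]
  omega

theorem pv_firstNW_append_nws (o : List Char) (c : Char) (hc : PySem.Chars.isspace c = false) :
    pvFirstNW (o ++ [c]) = some ((pvFirstNW o).getD o.length) := by
  unfold pvFirstNW
  rw [List.findIdx?_append]
  have h1 : List.findIdx? (fun c => !PySem.Chars.isspace c) [c] = some 0 := by simp [List.findIdx?_cons, hc]
  cases h : List.findIdx? (fun c => !PySem.Chars.isspace c) o with
  | none => simp [h1]
  | some s => simp [h1]

theorem pv_endNW_append_nws (o : List Char) (c : Char) (hc : PySem.Chars.isspace c = false) :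
    pvEndNW (o ++ [c]) = o.length + 1 := by
  unfold pvEndNW
  simp [hc]

-- rstrip is a take
theorem pv_dropWhile_rev (m : List Char) :
    (m.dropWhile PySem.Chars.isspace).reverse =
      m.reverse.take (m.length - (m.takeWhile PySem.Chars.isspace).length) := by
  induction m with
  | nil => rfl
  | cons c t ih =>
    by_cases hc : PySem.Chars.isspace c = true
    · have hle : (t.takeWhile PySem.Chars.isspace).length ≤ t.length := by
        have := (List.takeWhile_prefix (l := t) PySem.Chars.isspace).length_le
        simpa using this
      rw [List.dropWhile_cons_of_pos hc, List.takeWhile_cons_of_pos hc]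
      simp only [List.reverse_cons, List.length_cons]
      rw [ih, List.take_append_of_le_length (by simp only [List.length_reverse]; omega)]
      congr 1
      omega
    · rw [List.dropWhile_cons_of_neg hc, List.takeWhile_cons_of_neg hc]
      simp

theorem pv_rstrip_take (o : List Char) : PySem.Chars.rstrip o = o.take (pvEndNW o) := by
  have h := pv_dropWhile_rev o.reverse
  simp only [List.reverse_reverse, List.length_reverse] at h
  unfold PySem.Chars.rstrip pvEndNW
  rw [h]

theorem pv_strip_eq (o : List Char) :
    (match pvFirstNW o with
     | none => ([] : List Char)
     | some s => (o.take (pvEndNW o)).drop s) = PySem.Chars.strip o := by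
  induction o with
  | nil => rfl
  | cons c r ih =>
    by_cases hc : PySem.Chars.isspace c = true
    · have hstep : pvFirstNW (c :: r) = (pvFirstNW r).map (· + 1) := by
        unfold pvFirstNW; rw [List.findIdx?_cons]; simp [hc]
      have hstrip : PySem.Chars.strip (c :: r) = PySem.Chars.strip r := by
        simp [PySem.Chars.strip, PySem.Chars.lstrip, List.dropWhile_cons_of_pos hc]
      cases h : pvFirstNW r with
      | none =>
        rw [hstep, h]
        have hall : ∀ x ∈ r, PySem.Chars.isspace x = true := by
          intro x hx
          have := (List.findIdx?_eq_none_iff.mp h) x hx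
          simpa using this
        have : PySem.Chars.strip r = [] := by
          simp [PySem.Chars.strip, PySem.Chars.lstrip, List.dropWhile_eq_nil_iff.mpr hall,
            PySem.Chars.rstrip]
        simp [hstrip, this]
      | some s =>
        rw [hstep, h]
        have hne : (r.reverse.takeWhile PySem.Chars.isspace).length ≠ r.reverse.length := by
          intro heq
          have := (List.takeWhile_prefix (l := r.reverse) PySem.Chars.isspace).eq_of_length heq
          have hall : ∀ x ∈ r, PySem.Chars.isspace x = true := by
            intro x hx
            have hx' : x ∈ r.reverse.takeWhile PySem.Chars.isspace := by
              rw [this]; exact List.mem_reverse.mpr hx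
            exact List.mem_takeWhile_imp hx'
          have : List.findIdx? (fun c => !PySem.Chars.isspace c) r = none := by
            rw [List.findIdx?_eq_none_iff]; intro x hx; simp [hall x hx]
          unfold pvFirstNW at h; rw [this] at h; cases h
        have hle : (r.reverse.takeWhile PySem.Chars.isspace).length ≤ r.length := by
          have := (List.takeWhile_prefix (l := r.reverse) PySem.Chars.isspace).length_le
          simpa using this
        have hend : pvEndNW (c :: r) = pvEndNW r + 1 := by
          unfold pvEndNW
          simp only [List.reverse_cons, List.length_cons]
          rw [List.takeWhile_append, if_neg (by simpa using hne)]
          omega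
        rw [hend, hstrip, ← ih, h]
        simp
    · have hstep : pvFirstNW (c :: r) = some 0 := by
        unfold pvFirstNW; rw [List.findIdx?_cons]; simp [hc]
      rw [hstep]
      have hl : PySem.Chars.strip (c :: r) = PySem.Chars.rstrip (c :: r) := by
        simp [PySem.Chars.strip, PySem.Chars.lstrip, List.dropWhile_cons_of_neg hc]
      rw [hl, pv_rstrip_take]
      simp

-- A's loop computes the counts of '\t' and ' ' in the leading space/tab prefix
theorem pv_countWS_eq (l : List Char) (t s : Int) :
    pvCountWS l (t, s) =
      (t + ((l.takeWhile (fun c => c = ' ' || c = '\t')).count '\t' : Int),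
       s + ((l.takeWhile (fun c => c = ' ' || c = '\t')).count ' ' : Int)) := by
  induction l generalizing t s with
  | nil => simp [pvCountWS]
  | cons c rest ih =>
    by_cases hsp : c = ' '
    · subst hsp
      simp [pvCountWS, List.takeWhile, ih]
      ring
    · by_cases htab : c = '\t'
      · subst htab
        simp [pvCountWS, List.takeWhile, ih, hsp]
        ring
      · simp [pvCountWS, List.takeWhile, hsp, htab]

-- replace '\t' -> '  ' is tab expansion
theorem pv_replace_go (fuel : Nat) (l acc : List Char) (h : l.length ≤ fuel) :
    PySem.Chars.replace.go ['\t'] [' ', ' '] fuel l acc = acc.reverse ++ pvExpand l := by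
  induction fuel generalizing l acc with
  | zero =>
    have : l = [] := by cases l <;> simp_all
    subst this
    rw [PySem.Chars.replace.go]
    simp [pvExpand]
  | succ fuel ih =>
    cases l with
    | nil => rw [PySem.Chars.replace.go]; simp [pvExpand]; omega
    | cons c t =>
      rw [PySem.Chars.replace.go]
      by_cases hc : c = '\t'
      · subst hc
        rw [if_pos (by simp [List.isPrefixOf])]
        simp only [List.length_cons] at h
        rw [ih _ _ (by simpa using h)]
        simp [pvExpand]
      · rw [if_neg (by simp [List.isPrefixOf]; exact fun hh => hc hh.symm)]
        simp only [List.length_cons] at h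
        rw [ih _ _ (by omega)]
        simp [pvExpand, hc]

theorem pv_replace_expand (cs : List Char) :
    PySem.Chars.replace cs ['\t'] [' ', ' '] = pvExpand cs := by
  rw [PySem.Chars.replace]
  rw [if_neg (by simp)]
  exact pv_replace_go cs.length cs [] le_rfl

-- head of split('#', 1)
theorem pv_go_zero_head (fuel : Nat) (l cur p : List Char) :
    (PySem.Chars.splitOnMax.go ['#'] fuel 0 l cur [p]).headD [] = p := by
  cases fuel with
  | zero => rw [PySem.Chars.splitOnMax.go]; simp
  | succ fuel =>
    cases l with
    | nil => rw [PySem.Chars.splitOnMax.go]; simp; omega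
    | cons c t => rw [PySem.Chars.splitOnMax.go]; simp

theorem pv_go_head (fuel : Nat) (l cur : List Char) (h : l.length ≤ fuel) :
    (PySem.Chars.splitOnMax.go ['#'] fuel 1 l cur []).headD [] =
      cur.reverse ++ l.takeWhile (· ≠ '#') := by
  induction fuel generalizing l cur with
  | zero =>
    have : l = [] := by cases l <;> simp_all
    subst this
    rw [PySem.Chars.splitOnMax.go]; simp
  | succ fuel ih =>
    cases l with
    | nil => rw [PySem.Chars.splitOnMax.go]; simp; omega
    | cons c t =>
      rw [PySem.Chars.splitOnMax.go]
      by_cases hc : c = '#'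
      · subst hc
        rw [if_neg (by omega), if_pos (by simp [List.isPrefixOf])]
        simp only [List.length_singleton, List.drop_succ_cons, List.drop_zero]
        rw [pv_go_zero_head]
        simp
      · rw [if_neg (by omega), if_neg (by simp [List.isPrefixOf]; exact fun hh => hc hh.symm)]
        simp only [List.length_cons] at h
        rw [ih t (c :: cur) (by omega)]
        simp [hc]

theorem pv_split_head (l : List Char) :
    (PySem.Chars.splitOnMax l ['#'] 1).headD [] = l.takeWhile (· ≠ '#') := by
  rw [PySem.Chars.splitOnMax]
  rw [if_neg (by omega)]
  have h1 : (1 : Int).toNat = 1 := rfl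
  rw [h1]
  rw [pv_go_head (l.length + 1) l [] (by omega)]
  simp

theorem pv_headD_map (ps : List (List Char)) :
    (ps.map String.ofList).headD "" = String.ofList (ps.headD []) := by
  cases ps with
  | nil => rfl
  | cons a l => simp

-- B's loop never sees '#': it equals the loop on the '#'-free prefix
theorem pv_scanB_break (l : List Char) :
    ∀ (t s : Int) (cnt : Bool) (o : List Char) (st : Option Nat) (en : Nat),
    pvScanB l t s cnt o st en = pvScanB (l.takeWhile (· ≠ '#')) t s cnt o st en := by
  induction l with
  | nil => intro t s cnt o st en; rfl
  | cons c rest ih =>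
    intro t s cnt o st en
    by_cases hc : c = '#'
    · subst hc
      simp [pvScanB]
    · rw [List.takeWhile_cons_of_pos (by simp [hc])]
      simp only [pvScanB, if_neg hc]
      simp only [ih]

theorem pvCntT_sp (r : List Char) : pvCntT (' ' :: r) = pvCntT r := by
  simp [pvCntT]
theorem pvCntS_sp (r : List Char) : pvCntS (' ' :: r) = pvCntS r + 1 := by
  simp [pvCntS]
theorem pvCntT_tab (r : List Char) : pvCntT ('\t' :: r) = pvCntT r + 1 := by
  simp [pvCntT]
theorem pvCntS_tab (r : List Char) : pvCntS ('\t' :: r) = pvCntS r := by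
  simp [pvCntS]
theorem pvCntT_other (c : Char) (r : List Char) (hsp : c ≠ ' ') (hct : c ≠ '\t') :
    pvCntT (c :: r) = 0 := by
  simp [pvCntT, hsp, hct]
theorem pvCntS_other (c : Char) (r : List Char) (hsp : c ≠ ' ') (hct : c ≠ '\t') :
    pvCntS (c :: r) = 0 := by
  simp [pvCntS, hsp, hct]

theorem pv_strip_none (o : List Char) (h : pvFirstNW o = none) : PySem.Chars.strip o = [] := by
  have hh := pv_strip_eq o
  rw [h] at hh
  simpa using hh.symm

theorem pv_strip_some (o : List Char) (s0 : Nat) (h : pvFirstNW o = some s0) :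
    (o.take (pvEndNW o)).drop s0 = PySem.Chars.strip o := by
  have hh := pv_strip_eq o
  rw [h] at hh
  simpa using hh

theorem pv_finishB_eq (t s : Int) (o : List Char) :
    pvFinishB t s o (pvFirstNW o) (pvEndNW o) =
      (String.ofList (PySem.Chars.strip o), t + PySem.Int.floordiv s 4) := by
  unfold pvFinishB
  refine Prod.ext ?_ rfl
  cases hf : pvFirstNW o with
  | none =>
    show "" = String.ofList (PySem.Chars.strip o)
    rw [pv_strip_none o hf]
  | some s0 =>
    show String.ofList (PySem.List.slice o (some (s0 : Int)) (some ((pvEndNW o : Nat) : Int)))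
        = String.ofList (PySem.Chars.strip o)
    rw [← pv_strip_some o s0 hf, PySem.List.slice_natCast, List.drop_take]

-- the main loop invariant of B's fused pass
theorem pv_scanB_main (l : List Char) :
    ∀ (t s : Int) (cnt : Bool) (o : List Char),
    (∀ c ∈ l, pvDomChar c = true) → (∀ c ∈ l, c ≠ '#') →
    pvScanB l t s cnt o (pvFirstNW o) (pvEndNW o) =
      (String.ofList (PySem.Chars.strip (o ++ pvExpand l)),
       (if cnt then t + pvCntT l else t) +
         PySem.Int.floordiv (if cnt then s + pvCntS l else s) 4) := by
  induction l with
  | nil =>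
    intro t s cnt o _ _
    simp only [pvScanB, pvExpand, List.flatMap_nil, List.append_nil]
    rw [pv_finishB_eq]
    cases cnt <;> simp [pvCntT, pvCntS]
  | cons c rest ih =>
    intro t s cnt o hd hnc
    have hdc : pvDomChar c = true := hd c (by simp)
    have hdrest : ∀ x ∈ rest, pvDomChar x = true := fun x hx => hd x (by simp [hx])
    have hncrest : ∀ x ∈ rest, x ≠ '#' := fun x hx => hnc x (by simp [hx])
    have hc : c ≠ '#' := hnc c (by simp)
    simp only [pvScanB, if_neg hc]
    by_cases hct : c = '\t'
    · subst hct
      have hws2 : ∀ x ∈ [' ', ' '], PySem.Chars.isspace x = true := by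
        intro x hx
        have hx' : x = ' ' := by simpa using hx
        subst hx'
        rfl
      have e1 : pvFirstNW o = pvFirstNW (o ++ [' ', ' ']) :=
        (pv_firstNW_append_ws o [' ', ' '] hws2).symm
      have e2 : pvEndNW o = pvEndNW (o ++ [' ', ' ']) :=
        (pv_endNW_append_ws o [' ', ' '] hws2).symm
      rw [List.append_assoc]
      simp only [List.singleton_append]
      rw [e1, e2]
      cases cnt
      · simp only [Bool.false_eq_true, if_false]
        rw [ih t s false (o ++ [' ', ' ']) hdrest hncrest]
        simp [pvExpand, List.append_assoc]
      · simp only [if_true, if_neg (show ¬('\t' : Char) = ' ' from by decide)]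
        rw [ih (t + 1) s true (o ++ [' ', ' ']) hdrest hncrest]
        simp [pvExpand, List.append_assoc, pvCntT_tab, pvCntS_tab]
        ring_nf
    · rw [if_neg hct]
      by_cases hsp : c = ' '
      · subst hsp
        have hws1 : ∀ x ∈ [' '], PySem.Chars.isspace x = true := by
          intro x hx
          have hx' : x = ' ' := by simpa using hx
          subst hx'
          rfl
        have e1 : pvFirstNW o = pvFirstNW (o ++ [' ']) :=
          (pv_firstNW_append_ws o [' '] hws1).symm
        have e2 : pvEndNW o = pvEndNW (o ++ [' ']) :=
          (pv_endNW_append_ws o [' '] hws1).symm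
        rw [e1, e2]
        cases cnt
        · simp only [Bool.false_eq_true, if_false]
          rw [ih t s false (o ++ [' ']) hdrest hncrest]
          simp [pvExpand, List.append_assoc]
        · simp only [if_true]
          rw [ih t (s + 1) true (o ++ [' ']) hdrest hncrest]
          simp [pvExpand, List.append_assoc, pvCntT_sp, pvCntS_sp]
          ring_nf
      · -- c is neither ' ' nor '\t'
        have hcond : (c = ' ' || c = '\n' || c = '\r' || c = '\x0b' || c = '\x0c')
            = PySem.Chars.isspace c := pv_dom_ws5 c hdc hct
        by_cases hws : PySem.Chars.isspace c = true
        · rw [if_pos (by rw [hcond]; exact hws)]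
          have hws1 : ∀ x ∈ [c], PySem.Chars.isspace x = true := by
            intro x hx; simp at hx; subst hx; exact hws
          have e1 : pvFirstNW o = pvFirstNW (o ++ [c]) :=
            (pv_firstNW_append_ws o [c] hws1).symm
          have e2 : pvEndNW o = pvEndNW (o ++ [c]) :=
            (pv_endNW_append_ws o [c] hws1).symm
          rw [e1, e2]
          cases cnt
          · simp only [Bool.false_eq_true, if_false]
            rw [ih t s false (o ++ [c]) hdrest hncrest]
            simp [pvExpand, List.append_assoc, hct]
          · simp only [if_true, if_neg hsp, if_neg hct]
            rw [ih t s false (o ++ [c]) hdrest hncrest]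
            simp [pvExpand, List.append_assoc, hct,
              pvCntT_other c rest hsp hct, pvCntS_other c rest hsp hct]
        · rw [if_neg (by rw [hcond]; exact hws)]
          have hwsf : PySem.Chars.isspace c = false := by
            cases h : PySem.Chars.isspace c
            · rfl
            · exact absurd h hws
          have e1 : (some (match pvFirstNW o with
                | none => (o ++ [c]).length - 1
                | some s => s) : Option Nat) = pvFirstNW (o ++ [c]) := by
            rw [pv_firstNW_append_nws o c hwsf]
            cases hf : pvFirstNW o <;> simp
          have e2 : (o ++ [c]).length = pvEndNW (o ++ [c]) := by
            rw [pv_endNW_append_nws o c hwsf]; simp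
          rw [e1, e2]
          cases cnt
          · simp only [Bool.false_eq_true, if_false]
            rw [ih t s false (o ++ [c]) hdrest hncrest]
            simp [pvExpand, List.append_assoc, hct]
          · simp only [if_true, if_neg hsp, if_neg hct]
            rw [ih t s false (o ++ [c]) hdrest hncrest]
            simp [pvExpand, List.append_assoc, hct,
              pvCntT_other c rest hsp hct, pvCntS_other c rest hsp hct]

-- ===== VERDICT (by name: the statement is the Claim_ definition above) =====
theorem count_line_py_spec : Claim_equal_count_line_py := by
  intro line hdom
  unfold Spec_count_line_py count_line_py count_line_py_alt
  have hsplit : ((PySem.Str.splitMax? line "#" 1).getD []).headD ""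
      = String.ofList (line.toList.takeWhile (· ≠ '#')) := by
    rw [PySem.Str.splitMax?]
    rw [show ("#" : String).toList = ['#'] from by decide]
    rw [PySem.Chars.splitMax?, if_neg (by decide)]
    simp only [Option.map_some, Option.getD_some]
    rw [pv_headD_map, pv_split_head]
  rw [hsplit]
  have hd : ∀ c ∈ line.toList.takeWhile (· ≠ '#'), pvDomChar c = true := by
    intro c hcmem
    have hmem : c ∈ line.toList := List.takeWhile_subset _ hcmem
    have hall := hdom
    unfold Dom_count_line_py pvDomStr at hall
    exact List.all_eq_true.mp hall c hmem
  have hnc : ∀ c ∈ line.toList.takeWhile (· ≠ '#'), c ≠ '#' := by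
    intro c hcmem
    have := List.mem_takeWhile_imp hcmem
    simpa using this
  rw [pv_scanB_break]
  rw [show (none : Option Nat) = pvFirstNW [] from rfl,
      show (0 : Nat) = pvEndNW [] from rfl,
      pv_scanB_main _ 0 0 true [] hd hnc]
  refine Prod.ext ?_ ?_
  · simp only
    have hkey : (PySem.Str.strip (PySem.Str.replace
          (String.ofList (line.toList.takeWhile (· ≠ '#'))) "\t" "  ")).toList
        = PySem.Chars.strip (pvExpand (line.toList.takeWhile (· ≠ '#'))) := by
      rw [PySem.Str.toList_strip, PySem.Str.toList_replace, String.toList_ofList]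
      rw [show ("\t" : String).toList = ['\t'] from by decide,
          show ("  " : String).toList = [' ', ' '] from by decide]
      rw [pv_replace_expand]
    simp only [List.nil_append]
    rw [← hkey, String.ofList_toList]
  · simp only [String.toList_ofList]
    rw [pv_countWS_eq]
    simp [pvCntT, pvCntS]
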